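-- pv_equiv track=rewrite | github.com/senbox-org/sen2like | sen2like/sen2like/grids/wrskml2db.py | readDescription
-- ===== SOURCE A (Python) =====
-- def readDescription(des):
--     """
--     read kml description and derive a dictionary
--     with key/value for each parameters
--     (expected keys: ['UTM_WKT', 'EPSG', 'TILE_ID', 'LL_WKT', 'MGRS_REF'])
--     """
--
--     # read string stream
--     lines = []
--     line = ''
--     isText = False
--     for c in des:
--         if c == '<':
--             isText = False
--             if line.strip() != '':
--                 lines.append(line)
--             line = ''
--         if isText:
--             line += c
--         if c == '>':
--             isText = True
--
--     # fill dictionary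
--     meta = {}
--     for i in range(0, len(lines), 2):
--         meta[lines[i]] = lines[i + 1]
--
--     # return dictionary
--     return meta
-- ===== SOURCE B (Python) =====
-- def readDescription(des):
--     """
--     read kml description and derive a dictionary
--     with key/value for each parameters
--     """
--     # split on '<'; in every chunk that is terminated by a '<' the text
--     # after its first '>' is one raw segment (kept unstripped, skipped if blank)
--     segs = []
--     for chunk in des.split('<')[:-1]:
--         pos = chunk.find('>')
--         if pos != -1 and chunk[pos + 1:].strip() != '':
--             segs.append(chunk[pos + 1:])
--
--     # pair consecutive segments into the dictionary
--     meta = {}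
--     it = iter(segs)
--     for key in it:
--         meta[key] = next(it)
--     return meta
-- ===== Notes on version B (the rewrite author's own statement) =====
-- stated objective: alternative
-- what changed: Replaces the character-by-character state-machine scanner (isText flag, per-char accumulation) with a split-on-'<' pass that slices each chunk after its first '>', and replaces the index-stepping range(0,len,2) dict loop with a pairwise iterator walk.
import Mathlib
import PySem

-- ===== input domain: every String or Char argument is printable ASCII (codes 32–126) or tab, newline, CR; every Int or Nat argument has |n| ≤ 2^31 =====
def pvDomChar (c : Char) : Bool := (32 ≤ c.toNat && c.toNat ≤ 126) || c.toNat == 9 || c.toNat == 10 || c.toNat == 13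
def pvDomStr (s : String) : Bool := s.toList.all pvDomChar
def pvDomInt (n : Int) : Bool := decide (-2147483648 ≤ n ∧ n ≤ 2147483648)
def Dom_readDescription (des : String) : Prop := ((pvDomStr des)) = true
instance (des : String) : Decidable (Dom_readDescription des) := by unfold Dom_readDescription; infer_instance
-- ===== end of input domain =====

-- B replaces A's per-character scanner state machine with a split-on-'<' / slice-after-first-'>' pass
-- and pairs the segments with a two-at-a-time walk instead of an index-stepping range loop (objective: alternative).

-- ===== PORT A =====
-- one step of A's character scanner; state = (lines, line, isText)
def aScanStep (st : List (List Char) × List Char × Bool) (c : Char) :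
    List (List Char) × List Char × Bool :=
  let lines := st.1
  let line := st.2.1
  let isText := st.2.2
  let lines := if c = '<' then
      (if PySem.Chars.strip line ≠ [] then lines ++ [line] else lines) else lines
  let line := if c = '<' then [] else line
  let isText := if c = '<' then false else isText
  let line := if isText then line ++ [c] else line
  let isText := if c = '>' then true else isText
  (lines, line, isText)

def readDescription (des : String) : List (String × String) :=
  let st := des.toList.foldl aScanStep ([], [], false)
  let lines := st.1
  let meta0 := (PySem.List.pyRange 0 (lines.length : Int) 2).foldl
    (fun (d : PySem.Dict String String) i =>
      d.insert (String.mk (PySem.List.pyGetD lines i []))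
               (String.mk (PySem.List.pyGetD lines (i + 1) [])))
    PySem.Dict.empty
  meta0.items

-- ===== PORT B =====
-- body of B's 'for chunk in des.split('<')[:-1]' loop
def bSegStep (segs : List (List Char)) (chunk : List Char) : List (List Char) :=
  let pos := PySem.Chars.find chunk ['>']
  if pos ≠ -1 ∧ PySem.Chars.strip (PySem.List.slice chunk (some (pos + 1)) none) ≠ [] then
    segs ++ [PySem.List.slice chunk (some (pos + 1)) none]
  else segs

-- B's pairwise iterator walk 'for key in it: meta[key] = next(it)' (on an odd tail Python raises; outside Pre_)
def bPair (acc : PySem.Dict String String) : List (List Char) → PySem.Dict String String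
  | k :: v :: rest => bPair (acc.insert (String.mk k) (String.mk v)) rest
  | _ => acc

def readDescription_alt (des : String) : List (String × String) :=
  let segs := (PySem.List.slice (List.splitOn '<' des.toList) none (some (-1))).foldl bSegStep []
  (bPair PySem.Dict.empty segs).items

-- ===== PRECONDITION & SPEC =====
-- spec-side description of the text segments: in every chunk ending at a '<',
-- the text after the chunk's first '>' (if non-blank) is one segment
def kmlAfterGt (t : List Char) : List Char := (t.dropWhile (· ≠ '>')).tail

def kmlChunkSeg (t : List Char) : Option (List Char) :=
  if PySem.Chars.strip (kmlAfterGt t) = [] then none else some (kmlAfterGt t)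

def kmlSegs (des : String) : List (List Char) :=
  ((List.splitOn '<' des.toList).dropLast).filterMap kmlChunkSeg

-- Pre_ excludes exactly the inputs with an odd number of text segments, on which
-- A raises IndexError (lines[i + 1]) and B raises StopIteration (next(it)).
def Pre_readDescription (des : String) : Prop :=
  -- holds e.g. for ">EPSG<>32632<", ">TILE_ID<>31TCJ<>EPSG<>32632<" or ">MGRS_REF<>31TCJ 123<";
  -- fails for ">EPSG<" or ">UTM_WKT<>POINT(0 1)<>LL_WKT<" (odd segment count: A raises IndexError)
  Even (kmlSegs des).length
instance (des : String) : Decidable (Pre_readDescription des) := by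
  unfold Pre_readDescription; infer_instance

def pvWitness_readDescription : String := ">EPSG<>32632<"

def Spec_readDescription (des : String) (out : List (String × String)) : Prop :=
  out = readDescription_alt des
instance (des : String) (out : List (String × String)) : Decidable (Spec_readDescription des out) := by
  unfold Spec_readDescription; infer_instance

-- ===== CLAIM (what is proved, stated in full; the proofs are below) =====
def Claim_equal_readDescription : Prop := ∀ (des : String), Dom_readDescription des →
  Pre_readDescription des → Spec_readDescription des (readDescription des)

-- ===== LEMMAS AND PROOFS =====

-- recursive form of A's scanner
def kmlAux : List Char → List Char → Bool → List (List Char)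
  | [], _, _ => []
  | c :: cs, line, isText =>
    if c = '<' then
      (if PySem.Chars.strip line = [] then [] else [line]) ++ kmlAux cs [] false
    else
      kmlAux cs (if isText then line ++ [c] else line) (if c = '>' then true else isText)

-- A's scanner state, described over the chunk list
def kmlSegsFrom : List (List Char) → List Char → Bool → List (List Char)
  | t :: r :: rest, line, isText =>
    (if PySem.Chars.strip (line ++ (if isText then t else kmlAfterGt t)) = [] then []
     else [line ++ (if isText then t else kmlAfterGt t)]) ++ kmlSegsFrom (r :: rest) [] false
  | _, _, _ => []

theorem foldl_aScanStep (cs : List Char) : ∀ (lines : List (List Char)) (line : List Char)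
    (isText : Bool), (cs.foldl aScanStep (lines, line, isText)).1
      = lines ++ kmlAux cs line isText := by
  induction cs with
  | nil => intro lines line isText; simp [kmlAux]
  | cons c cs ih =>
    intro lines line isText
    by_cases hc : c = '<'
    · subst hc
      rw [List.foldl_cons,
        show aScanStep (lines, line, isText) '<'
          = ((if PySem.Chars.strip line ≠ [] then lines ++ [line] else lines),
             ([] : List Char), false) from by simp [aScanStep],
        ih]
      show _ = lines ++ ((if PySem.Chars.strip line = [] then [] else [line]) ++ kmlAux cs [] false)
      by_cases h : PySem.Chars.strip line = [] <;> simp [h]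
    · rw [List.foldl_cons,
        show aScanStep (lines, line, isText) c
          = (lines, (if isText then line ++ [c] else line),
             (if c = '>' then true else isText)) from by simp [aScanStep, hc],
        ih]
      show _ = lines ++ kmlAux (c :: cs) line isText
      rw [show kmlAux (c :: cs) line isText
        = kmlAux cs (if isText then line ++ [c] else line) (if c = '>' then true else isText)
        from by rw [kmlAux, if_neg hc]]

theorem splitOnP_ne_nil' {α : Type} (p : α → Bool) (l : List α) : List.splitOnP p l ≠ [] := by
  induction l with
  | nil => simp
  | cons x xs ih =>
    rw [List.splitOnP_cons]
    split_ifs <;> simp_all [List.modifyHead]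
    cases h : List.splitOnP p xs <;> simp_all

theorem kmlAux_eq_segsFrom (cs : List Char) : ∀ (line : List Char) (isText : Bool),
    kmlAux cs line isText = kmlSegsFrom (List.splitOnP (· == '<') cs) line isText := by
  induction cs with
  | nil => intro line isText; rw [List.splitOnP_nil]; rfl
  | cons c cs ih =>
    intro line isText
    rw [List.splitOnP_cons]
    by_cases hc : c = '<'
    · subst hc
      simp only [beq_self_eq_true, if_true, kmlAux]
      obtain ⟨t, rest, ht⟩ : ∃ t rest, List.splitOnP (· == '<') cs = t :: rest := by
        cases h : List.splitOnP (· == '<') cs with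
        | nil => exact absurd h (splitOnP_ne_nil' _ _)
        | cons t rest => exact ⟨t, rest, rfl⟩
      rw [ih, ht]
      simp [kmlSegsFrom, kmlAfterGt]
    · have hbc : (c == '<') = false := by simpa using hc
      simp only [hbc]
      obtain ⟨t, rest, ht⟩ : ∃ t rest, List.splitOnP (· == '<') cs = t :: rest := by
        cases h : List.splitOnP (· == '<') cs with
        | nil => exact absurd h (splitOnP_ne_nil' _ _)
        | cons t rest => exact ⟨t, rest, rfl⟩
      simp only [kmlAux, if_neg hc]
      rw [ih, ht]
      cases rest with
      | nil => simp [kmlSegsFrom]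
      | cons r rs =>
        by_cases hT : isText
        · subst hT; simp [kmlSegsFrom]
        · simp only [Bool.not_eq_true] at hT; subst hT
          by_cases hg : c = '>'
          · subst hg
            simp [kmlSegsFrom, kmlAfterGt]
          · have : kmlAfterGt (c :: t) = kmlAfterGt t := by
              simp [kmlAfterGt, List.dropWhile, hg]
            simp [kmlSegsFrom, this, hg]

theorem segsFrom_eq_filterMap (chunks : List (List Char)) :
    kmlSegsFrom chunks [] false = chunks.dropLast.filterMap kmlChunkSeg := by
  induction chunks with
  | nil => simp [kmlSegsFrom]
  | cons t rest ih =>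
    cases rest with
    | nil => simp [kmlSegsFrom]
    | cons r rs =>
      rw [List.dropLast_cons₂, List.filterMap_cons]
      rw [show kmlSegsFrom (t :: r :: rs) [] false
        = (if PySem.Chars.strip ([] ++ (if false then t else kmlAfterGt t)) = [] then []
           else [[] ++ (if false then t else kmlAfterGt t)]) ++ kmlSegsFrom (r :: rs) [] false
        from rfl]
      rw [ih]
      simp only [if_neg (Bool.false_ne_true), List.nil_append, kmlChunkSeg]
      split_ifs <;> simp

-- A's lines are exactly kmlSegs
theorem linesA_eq (des : String) :
    (des.toList.foldl aScanStep ([], [], false)).1 = kmlSegs des := by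
  rw [foldl_aScanStep, kmlAux_eq_segsFrom, segsFrom_eq_filterMap]
  simp [kmlSegs, List.splitOn]

-- '>' located by find = '>' located by dropWhile
theorem dropWhile_eq_drop_of (t : List Char) : ∀ (n : Nat),
    (∀ i, i < n → ¬ (['>'] <+: t.drop i)) → (['>'] <+: t.drop n) →
    t.dropWhile (· ≠ '>') = t.drop n := by
  induction t with
  | nil => intro n _ h2; simp at h2
  | cons c t ih =>
    intro n h1 h2
    cases n with
    | zero =>
      simp only [List.drop_zero] at h2
      obtain ⟨hc, -⟩ := List.cons_prefix_cons.mp h2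
      simp [List.dropWhile, ← hc, List.drop_zero]
    | succ n =>
      have hc : c ≠ '>' := by
        intro hc
        subst hc
        exact h1 0 (Nat.succ_pos n) (by
          simpa using List.cons_prefix_cons.mpr ⟨rfl, List.nil_prefix⟩)
      rw [List.dropWhile_cons_of_pos (by simpa using hc), List.drop_succ_cons]
      exact ih n (fun i hi => by simpa using h1 (i + 1) (by omega)) (by simpa using h2)

theorem find_gt_spec (t : List Char) (h : PySem.Chars.find t ['>'] ≠ -1) :
    t.drop ((PySem.Chars.find t ['>']).toNat) = t.dropWhile (· ≠ '>') := by
  have h0 : 0 ≤ PySem.Chars.find t ['>'] := by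
    have := PySem.Chars.neg_one_le_find (s := t) (sub := ['>'])
    omega
  obtain ⟨hpre, hmin⟩ := PySem.Chars.find_spec h0
  exact (dropWhile_eq_drop_of t _ hmin hpre).symm

theorem bSegStep_eq (segs : List (List Char)) (t : List Char) :
    bSegStep segs t = segs ++ (kmlChunkSeg t).toList := by
  simp only [bSegStep, kmlChunkSeg]
  by_cases h : PySem.Chars.find t ['>'] = -1
  · have hmem : ¬ ['>'] <:+: t := (PySem.Chars.find_eq_neg_one_iff t ['>']).mp h
    have hnot : '>' ∉ t := fun hm => by
      obtain ⟨s, r, rfl⟩ := List.append_of_mem hm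
      exact hmem ⟨s, r, by simp⟩
    have hag : kmlAfterGt t = [] := by
      unfold kmlAfterGt
      rw [List.dropWhile_eq_nil_iff.mpr]
      · rfl
      · intro x hx
        simp only [ne_eq, decide_not, Bool.not_eq_eq_eq_not, Bool.not_true,
          decide_eq_false_iff_not]
        exact fun hxx => hnot (hxx ▸ hx)
    rw [hag]
    simp [h, show PySem.Chars.strip ([] : List Char) = [] by decide]
  · have h0 : 0 ≤ PySem.Chars.find t ['>'] := by
      have := PySem.Chars.neg_one_le_find (s := t) (sub := ['>'])
      omega
    have hslice : PySem.List.slice t (some (PySem.Chars.find t ['>'] + 1)) none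
        = kmlAfterGt t := by
      rw [PySem.List.slice_from t (by omega)]
      have : (PySem.Chars.find t ['>'] + 1).toNat = (PySem.Chars.find t ['>']).toNat + 1 := by
        omega
      rw [this, ← List.tail_drop, find_gt_spec t h, kmlAfterGt]
    rw [hslice]
    by_cases hs : PySem.Chars.strip (kmlAfterGt t) = []
    · rw [if_neg (fun hc => hc.2 hs), if_pos hs]
      simp
    · rw [if_pos ⟨h, hs⟩, if_neg hs]
      simp

theorem slice_neg_one {α : Type} (l : List α) :
    PySem.List.slice l none (some (-1)) = l.dropLast := by
  cases l with
  | nil => rfl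
  | cons x xs =>
    simp [PySem.List.slice, PySem.List.clampIdx, List.dropLast_eq_take]
    congr 1
    split_ifs <;> omega

theorem foldl_bSegStep (l : List (List Char)) : ∀ (acc : List (List Char)),
    l.foldl bSegStep acc = acc ++ l.filterMap kmlChunkSeg := by
  induction l with
  | nil => intro acc; simp
  | cons t rest ih =>
    intro acc
    rw [List.foldl_cons, bSegStep_eq, ih, List.filterMap_cons]
    cases kmlChunkSeg t <;> simp

-- B's segments are exactly kmlSegs
theorem segsB_eq (des : String) :
    (PySem.List.slice (List.splitOn '<' des.toList) none (some (-1))).foldl bSegStep []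
      = kmlSegs des := by
  rw [slice_neg_one, foldl_bSegStep]
  simp [kmlSegs]

-- the index-stepping range loop and the two-at-a-time walk agree on even-length lists
theorem pyRange_two_cons (b : Int) (hb : 0 < b) :
    PySem.List.pyRange 0 b 2 = 0 :: (PySem.List.pyRange 0 (b - 2) 2).map (· + 2) := by
  rw [PySem.List.pyRange_of_pos 0 b (by norm_num),
      PySem.List.pyRange_of_pos 0 (b - 2) (by norm_num)]
  have hcount : (if (0:Int) < b then ((b - 0 + 2 - 1) / 2).toNat else 0)
      = (if (0:Int) < b - 2 then ((b - 2 - 0 + 2 - 1) / 2).toNat else 0) + 1 := by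
    split_ifs <;> omega
  rw [hcount, List.range_succ_eq_map, List.map_cons, List.map_map, List.map_map]
  congr 1

theorem pair_loop : ∀ (lines : List (List Char)) (d : PySem.Dict String String),
    Even lines.length →
    (PySem.List.pyRange 0 (lines.length : Int) 2).foldl
      (fun (d : PySem.Dict String String) i =>
        d.insert (String.mk (PySem.List.pyGetD lines i []))
                 (String.mk (PySem.List.pyGetD lines (i + 1) []))) d
      = bPair d lines
  | [], d, _ => by
    simp [bPair, PySem.List.pyRange_of_pos 0 0 (by norm_num : (0:Int) < 2)]
  | [k], d, hev => by
    exact absurd hev (by simp)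
  | k :: v :: rest, d, hev => by
    have hb : (0:Int) < ((k :: v :: rest).length : Int) := by simp; omega
    rw [pyRange_two_cons _ hb]
    have hb2 : (((k :: v :: rest).length : Nat) : Int) - 2 = (rest.length : Int) := by
      simp
      omega
    rw [hb2, List.foldl_cons]
    have g0 : PySem.List.pyGetD (k :: v :: rest) 0 [] = k := by
      rw [PySem.List.pyGetD_of_nonneg _ _ (by norm_num)]; rfl
    have g1 : PySem.List.pyGetD (k :: v :: rest) (0 + 1) [] = v := by
      rw [PySem.List.pyGetD_of_nonneg _ _ (by norm_num)]; rfl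
    rw [g0, g1, List.foldl_map]
    rw [PySem.List.foldl_congr_mem _ _
      (fun (d : PySem.Dict String String) i =>
        d.insert (String.mk (PySem.List.pyGetD rest i []))
                 (String.mk (PySem.List.pyGetD rest (i + 1) []))) _
      (by
        intro acc i hi
        have hi0 : 0 ≤ i := by
          have := (PySem.List.mem_pyRange_iff_of_pos (by norm_num : (0:Int) < 2) i).mp hi
          omega
        have e2 : PySem.List.pyGetD (k :: v :: rest) (i + 2) []
            = PySem.List.pyGetD rest i [] := by
          rw [PySem.List.pyGetD_of_nonneg _ _ (by omega),
            PySem.List.pyGetD_of_nonneg _ _ hi0]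
          have : (i + 2).toNat = i.toNat + 2 := by omega
          rw [this]
          simp [List.getD]
        have e3 : PySem.List.pyGetD (k :: v :: rest) (i + 2 + 1) []
            = PySem.List.pyGetD rest (i + 1) [] := by
          rw [PySem.List.pyGetD_of_nonneg _ _ (by omega),
            PySem.List.pyGetD_of_nonneg _ _ (by omega)]
          have : (i + 2 + 1).toNat = (i + 1).toNat + 2 := by omega
          rw [this]
          simp [List.getD]
        rw [e2, e3])]
    have hevr : Even rest.length := by
      rcases hev with ⟨m, hm⟩
      simp at hm
      exact ⟨m - 1, by omega⟩
    rw [pair_loop rest _ hevr]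
    rfl

-- ===== VERDICT (by name: the statement is the Claim_ definition above) =====
theorem readDescription_spec : Claim_equal_readDescription := by
  intro des _ hpre
  unfold Spec_readDescription
  simp only [readDescription, readDescription_alt]
  rw [linesA_eq, segsB_eq]
  rw [pair_loop _ _ hpre]
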